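-- pv_equiv track=rewrite | github.com/tenshi341/pokemon-data-pipeline | scripts/bot.py | sanitize_team
-- ===== SOURCE A (Python) =====
-- def sanitize_team(team_text):
--     """
--     Firewall to replace illegal Gen9OU abilities/items with legal alternatives.
--     """
--     replacements = {
--         "Ability: Sand Veil": "Ability: Rough Skin",
--         "Ability: Snow Cloak": "Ability: Cursed Body",
--         "Ability: Moody": "Ability: Inner Focus",
--         "Ability: Arena Trap": "Ability: Sand Force",
--         "Ability: Shadow Tag": "Ability: Frisk",
--         "Ability: Magnet Pull": "Ability: Sturdy",
--         "Item: King's Rock": "Item: Leftovers",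
--         "Item: Razor Fang": "Item: Life Orb",
--         "Baton Pass": "U-turn",
--         "Last Respects": "Shadow Ball",
--         "Shed Tail": "Substitute",
--     }
--     for banned, legal in replacements.items():
--         if banned in team_text:
--             team_text = team_text.replace(banned, legal)
--     return team_text
-- ===== SOURCE B (Python) =====
-- def sanitize_team(team_text):
--     """
--     Firewall to replace illegal Gen9OU abilities/items with legal alternatives,
--     in a single left-to-right pass over the text.
--     """
--     replacements = [
--         ("Ability: Sand Veil", "Ability: Rough Skin"),
--         ("Ability: Snow Cloak", "Ability: Cursed Body"),
--         ("Ability: Moody", "Ability: Inner Focus"),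
--         ("Ability: Arena Trap", "Ability: Sand Force"),
--         ("Ability: Shadow Tag", "Ability: Frisk"),
--         ("Ability: Magnet Pull", "Ability: Sturdy"),
--         ("Item: King's Rock", "Item: Leftovers"),
--         ("Item: Razor Fang", "Item: Life Orb"),
--         ("Baton Pass", "U-turn"),
--         ("Last Respects", "Shadow Ball"),
--         ("Shed Tail", "Substitute"),
--     ]
--     out = []
--     i = 0
--     n = len(team_text)
--     while i < n:
--         for banned, legal in replacements:
--             if team_text.startswith(banned, i):
--                 out.append(legal)
--                 i += len(banned)
--                 break
--         else:
--             out.append(team_text[i])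
--             i += 1
--     return "".join(out)
-- ===== Notes on version B (the rewrite author's own statement) =====
-- stated objective: alternative
-- what changed: Replaces 11 sequential full-text str.replace scans by one simultaneous left-to-right scan that at each position tries the banned strings in dict order and emits the replacement or the character; this is equivalent because no banned string can overlap another and no replacement value re-creates a banned string.
import Mathlib
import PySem

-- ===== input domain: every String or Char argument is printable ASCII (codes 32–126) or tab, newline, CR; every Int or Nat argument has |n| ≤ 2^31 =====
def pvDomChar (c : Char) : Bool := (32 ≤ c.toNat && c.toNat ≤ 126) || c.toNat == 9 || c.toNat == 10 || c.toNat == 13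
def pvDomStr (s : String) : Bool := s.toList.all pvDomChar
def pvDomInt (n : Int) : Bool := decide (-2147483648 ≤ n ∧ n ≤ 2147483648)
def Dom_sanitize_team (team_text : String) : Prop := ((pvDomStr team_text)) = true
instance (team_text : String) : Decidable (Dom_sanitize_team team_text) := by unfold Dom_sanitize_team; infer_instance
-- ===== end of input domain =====

-- B replaces A's 11 sequential full-text str.replace passes by one simultaneous left-to-right
-- scan (equivalent here because the banned strings cannot overlap and no replacement value
-- can re-create a banned string); objective: alternative algorithm, same result.

-- ===== PORT A =====
-- the `replacements` dict of A, in insertion order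
def pvReplacementsA : List (String × String) :=
  [("Ability: Sand Veil", "Ability: Rough Skin"),
   ("Ability: Snow Cloak", "Ability: Cursed Body"),
   ("Ability: Moody", "Ability: Inner Focus"),
   ("Ability: Arena Trap", "Ability: Sand Force"),
   ("Ability: Shadow Tag", "Ability: Frisk"),
   ("Ability: Magnet Pull", "Ability: Sturdy"),
   ("Item: King's Rock", "Item: Leftovers"),
   ("Item: Razor Fang", "Item: Life Orb"),
   ("Baton Pass", "U-turn"),
   ("Last Respects", "Shadow Ball"),
   ("Shed Tail", "Substitute")]

def sanitize_team (team_text : String) : String :=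
  pvReplacementsA.foldl
    (fun t p => if PySem.Str.isIn p.1 t then PySem.Str.replace t p.1 p.2 else t)
    team_text

-- ===== PORT B =====
-- the `replacements` dict of B, in insertion order
def pvReplacementsB : List (String × String) :=
  [("Ability: Sand Veil", "Ability: Rough Skin"),
   ("Ability: Snow Cloak", "Ability: Cursed Body"),
   ("Ability: Moody", "Ability: Inner Focus"),
   ("Ability: Arena Trap", "Ability: Sand Force"),
   ("Ability: Shadow Tag", "Ability: Frisk"),
   ("Ability: Magnet Pull", "Ability: Sturdy"),
   ("Item: King's Rock", "Item: Leftovers"),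
   ("Item: Razor Fang", "Item: Life Orb"),
   ("Baton Pass", "U-turn"),
   ("Last Respects", "Shadow Ball"),
   ("Shed Tail", "Substitute")]

-- Source B's while loop: at each position try the banned strings in dict order
-- (team_text.startswith(banned, i) = isPrefixOf on the remaining characters); on a hit emit
-- the legal string and jump over the banned one, otherwise emit the character and advance.
-- (the !isEmpty conjunct only guards termination; every key of the dict is nonempty)
def pvScan (ps : List (List Char × List Char)) (s : List Char) : List Char :=
  match s with
  | [] => []
  | c :: s' =>
    match h : ps.find? (fun p => !p.1.isEmpty && p.1.isPrefixOf (c :: s')) with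
    | some p => p.2 ++ pvScan ps (List.drop p.1.length (c :: s'))
    | none => c :: pvScan ps s'
termination_by s.length
decreasing_by
  · have hp := List.find?_some h
    have h1 : p.1 ≠ [] := by
      rcases Bool.and_eq_true .. |>.mp hp with ⟨h1, _⟩
      simpa [List.isEmpty_iff] using h1
    have := List.length_pos_of_ne_nil h1
    simp only [List.length_drop, List.length_cons]
    omega
  · simp

def sanitize_team_alt (team_text : String) : String :=
  String.ofList
    (pvScan (pvReplacementsB.map (fun p => (p.1.toList, p.2.toList))) team_text.toList)

-- ===== PRECONDITION & SPEC =====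
def Spec_sanitize_team (team_text : String) (out : String) : Prop := out = sanitize_team_alt team_text
instance (team_text : String) (out : String) : Decidable (Spec_sanitize_team team_text out) := by unfold Spec_sanitize_team; infer_instance

-- ===== CLAIM (what is proved, stated in full; the proofs are below) =====
def Claim_equal_sanitize_team : Prop := ∀ (team_text : String), Dom_sanitize_team team_text → Spec_sanitize_team team_text (sanitize_team team_text)

-- ===== LEMMAS AND PROOFS =====

-- reference form of one Python str.replace pass (left-to-right, non-overlapping)
def pvRepl (k v : List Char) (s : List Char) : List Char :=
  match s with
  | [] => []
  | c :: s' =>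
    if k ≠ [] ∧ k.isPrefixOf (c :: s') then v ++ pvRepl k v (List.drop k.length (c :: s'))
    else c :: pvRepl k v s'
termination_by s.length
decreasing_by
  · rename_i hcond
    have := List.length_pos_of_ne_nil hcond.1
    simp only [List.length_drop, List.length_cons]
    omega
  · simp

-- `a` and `b` are prefix-comparable (one could start a match inside/right at the other)
def pvCompat (a b : List Char) : Bool := a.isPrefixOf b || b.isPrefixOf a

-- the non-interference conditions under which sequential replacement = simultaneous scan:
-- every key is nonempty, no later key can start strictly inside an earlier key or inside an
-- earlier value, and no value is prefix-comparable with a later key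
def pvOKall : List (List Char × List Char) → Bool
  | [] => true
  | (k, v) :: ps =>
      !k.isEmpty && !v.isEmpty &&
      ps.all (fun p =>
        (List.range v.length).all (fun i => !pvCompat (v.drop i) p.1) &&
        (List.range p.1.length).all (fun j =>
          j == 0 || (!pvCompat (p.1.drop j) v && !pvCompat (p.1.drop j) k))) &&
      pvOKall ps

theorem pvPrefixSplit {a x y : List Char} (h : a <+: x ++ y) : a <+: x ∨ x <+: a := by
  obtain ⟨t, ht⟩ := h
  by_cases hl : a.length ≤ x.length
  · left
    have : a = (x ++ y).take a.length := by rw [← ht]; simp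
    rw [List.take_append_of_le_length hl] at this
    exact this ▸ List.take_prefix _ _
  · right
    have hx : x = (a ++ t).take x.length := by
      rw [ht, List.take_append_of_le_length (le_refl x.length)]
      simp
    rw [List.take_append_of_le_length (Nat.le_of_lt (Nat.lt_of_not_le hl))] at hx
    exact hx ▸ List.take_prefix _ _

theorem pvCompat_comm (a b : List Char) : pvCompat a b = pvCompat b a := by
  simp [pvCompat, Bool.or_comm]

theorem pvCompat_eq_false {a b : List Char} (h : pvCompat a b = false) :
    ¬ a <+: b ∧ ¬ b <+: a := by
  simp only [pvCompat, Bool.or_eq_false_iff] at h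
  refine ⟨fun hp => ?_, fun hp => ?_⟩
  · rw [← List.isPrefixOf_iff_prefix] at hp; simp [hp] at h
  · rw [← List.isPrefixOf_iff_prefix] at hp; simp [hp] at h

theorem pvReplaceGo (k v : List Char) (hk : k ≠ []) :
    ∀ (fuel : Nat) (l acc : List Char), l.length ≤ fuel →
      PySem.Chars.replace.go k v fuel l acc = acc.reverse ++ pvRepl k v l := by
  intro fuel
  induction fuel with
  | zero =>
    intro l acc hl
    have : l = [] := List.eq_nil_of_length_eq_zero (Nat.le_zero.mp hl)
    subst this
    simp [PySem.Chars.replace.go, pvRepl]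
  | succ n ih =>
    intro l acc hl
    cases l with
    | nil => simp [PySem.Chars.replace.go, pvRepl]
    | cons c t =>
      rw [PySem.Chars.replace.go]
      by_cases hp : k.isPrefixOf (c :: t)
      · rw [if_pos hp, pvRepl, if_pos ⟨hk, hp⟩]
        rw [ih _ _ (by
          have := List.length_pos_of_ne_nil hk
          simp only [List.length_drop, List.length_cons]
          simp only [List.length_cons] at hl
          omega)]
        simp
      · rw [if_neg hp, pvRepl, if_neg (by simp [hp]), ih _ _ (by simpa using hl)]
        simp

theorem pvReplace_eq (k v s : List Char) (hk : k ≠ []) :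
    PySem.Chars.replace s k v = pvRepl k v s := by
  rw [PySem.Chars.replace, if_neg (by simp [List.isEmpty_iff, hk])]
  simpa using pvReplaceGo k v hk s.length s [] (le_refl _)

theorem pvRepl_of_not_infix (k v : List Char) :
    ∀ (s : List Char), ¬ k <:+: s → pvRepl k v s = s := by
  intro s
  induction s with
  | nil => intro _; simp [pvRepl]
  | cons c s' ih =>
    intro h
    have hnp : ¬ (k ≠ [] ∧ k.isPrefixOf (c :: s')) := by
      rintro ⟨-, hp⟩
      exact h ((List.isPrefixOf_iff_prefix.mp hp).isInfix)
    rw [pvRepl, if_neg hnp, ih (fun hi => h (List.infix_cons hi))]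

theorem pvScan_empty : ∀ s, pvScan [] s = s := by
  intro s
  induction s with
  | nil => simp [pvScan]
  | cons c s' ih => simp [pvScan, ih]

theorem pvScan_cons_some (ps : List (List Char × List Char)) (c : Char) (s' : List Char) (p : List Char × List Char)
    (h : ps.find? (fun q => !q.1.isEmpty && q.1.isPrefixOf (c :: s')) = some p) :
    pvScan ps (c :: s') = p.2 ++ pvScan ps (List.drop p.1.length (c :: s')) := by
  rw [pvScan, h]

theorem pvScan_cons_none (ps : List (List Char × List Char)) (c : Char) (s' : List Char)
    (h : ps.find? (fun q => !q.1.isEmpty && q.1.isPrefixOf (c :: s')) = none) :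
    pvScan ps (c :: s') = c :: pvScan ps s' := by
  rw [pvScan, h]

theorem pvInert (ps : List (List Char × List Char)) :
    ∀ (v t : List Char), (∀ i < v.length, ∀ p ∈ ps, pvCompat (v.drop i) p.1 = false) →
      pvScan ps (v ++ t) = v ++ pvScan ps t := by
  intro v
  induction v with
  | nil => intro t _; simp
  | cons c v' ih =>
    intro t hv
    have hnone : (ps.find? (fun q => !q.1.isEmpty && q.1.isPrefixOf ((c :: v') ++ t))) = none := by
      apply List.find?_eq_none.mpr
      intro p hp hP
      rcases Bool.and_eq_true .. |>.mp hP with ⟨-, hpre⟩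
      have hcf := pvCompat_eq_false (hv 0 (by simp) p hp)
      simp only [List.drop_zero] at hcf
      rcases pvPrefixSplit (List.isPrefixOf_iff_prefix.mp hpre) with h1 | h1
      · exact hcf.2 h1
      · exact hcf.1 h1
    rw [List.cons_append, pvScan_cons_none ps c (v' ++ t) (by simpa using hnone),
      ih t (fun i hi p hp => by simpa using hv (i + 1) (by simpa using Nat.succ_lt_succ hi) p hp)]
    simp

theorem pvNoNew (k v k' : List Char) (hk : k ≠ [])
    (hkv : ∀ j < k'.length, pvCompat (k'.drop j) v = false) :
    ∀ (n : Nat) (s : List Char), s.length ≤ n → ∀ j < k'.length,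
      ¬ (k'.drop j) <+: s → ¬ (k'.drop j) <+: pvRepl k v s := by
  intro n
  induction n with
  | zero =>
    intro s hs j hj hpre
    have : s = [] := List.eq_nil_of_length_eq_zero (Nat.le_zero.mp hs)
    subst this
    intro habs
    have hnil : pvRepl k v [] = [] := by rw [pvRepl]
    have := habs.length_le
    simp [hnil] at this
    omega
  | succ n ih =>
    intro s hs j hj hpre
    cases s with
    | nil =>
      intro habs
      have hnil : pvRepl k v [] = [] := by rw [pvRepl]
      have := habs.length_le
      simp [hnil] at this
      omega
    | cons c s' =>
      by_cases hm : k.isPrefixOf (c :: s')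
      · rw [pvRepl, if_pos ⟨hk, hm⟩]
        intro habs
        have hcf := pvCompat_eq_false (hkv j hj)
        rcases pvPrefixSplit habs with h1 | h1
        · exact hcf.1 h1
        · exact hcf.2 h1
      · rw [pvRepl, if_neg (by simp [hm])]
        intro habs
        rw [List.drop_eq_getElem_cons hj] at habs
        rcases List.cons_prefix_cons.mp habs with ⟨hc, htl⟩
        by_cases hj1 : (k'.drop (j + 1)) <+: s'
        · apply hpre
          rw [List.drop_eq_getElem_cons hj, hc]
          exact List.cons_prefix_cons.mpr ⟨rfl, hj1⟩
        · have hjlt : j + 1 < k'.length := by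
            by_contra hge
            exact hj1 (by
              have : k'.drop (j + 1) = [] := List.drop_eq_nil_of_le (by omega)
              simp [this])
          exact ih s' (by simpa using hs) (j + 1) hjlt hj1 htl

theorem pvReplCommute (k v : List Char) :
    ∀ (m : Nat) (s : List Char), m ≤ s.length → (∀ i < m, ¬ k <+: s.drop i) →
      pvRepl k v s = s.take m ++ pvRepl k v (s.drop m) := by
  intro m
  induction m with
  | zero => intro s _ _; simp
  | succ m ih =>
    intro s hm hno
    cases s with
    | nil => simp at hm
    | cons c s' =>
      have h0 : ¬ k <+: (c :: s') := by simpa using hno 0 (by omega)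
      rw [pvRepl, if_neg (by
        rintro ⟨-, hp⟩
        exact h0 (List.isPrefixOf_iff_prefix.mp hp))]
      rw [ih s' (by simpa using hm) (fun i hi => by simpa using hno (i + 1) (by omega))]
      simp

theorem pvMain (k v : List Char) (ps : List (List Char × List Char))
    (hk : k ≠ []) (hv : v ≠ [])
    (hps : ∀ p ∈ ps, p.1 ≠ [])
    (hInert : ∀ p ∈ ps, ∀ i < v.length, pvCompat (v.drop i) p.1 = false)
    (hKey : ∀ p ∈ ps, ∀ j, 1 ≤ j → j < p.1.length →
      pvCompat (p.1.drop j) v = false ∧ pvCompat (p.1.drop j) k = false) :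
    ∀ (n : Nat) (s : List Char), s.length ≤ n →
      pvScan ps (pvRepl k v s) = pvScan ((k, v) :: ps) s := by
  have hnil : pvRepl k v [] = [] := by rw [pvRepl]
  have hsn : ∀ qs : List (List Char × List Char), pvScan qs [] = [] := fun qs => by rw [pvScan]
  intro n
  induction n with
  | zero =>
    intro s hs
    have : s = [] := List.eq_nil_of_length_eq_zero (Nat.le_zero.mp hs)
    subst this
    rw [hnil, hsn, hsn]
  | succ n ih =>
    intro s hs
    cases s with
    | nil => rw [hnil, hsn, hsn]
    | cons c s' =>
      by_cases hm : k.isPrefixOf (c :: s')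
      · -- the head of s is an occurrence of k: both sides emit v and continue after it
        have hrepl : pvRepl k v (c :: s') = v ++ pvRepl k v (List.drop k.length (c :: s')) := by
          rw [pvRepl, if_pos ⟨hk, hm⟩]
        have hklen := List.length_pos_of_ne_nil hk
        rw [hrepl, pvInert ps v _ (fun i hi p hp => hInert p hp i hi),
          ih (List.drop k.length (c :: s')) (by
            simp only [List.length_drop, List.length_cons]
            simp only [List.length_cons] at hs
            omega),
          pvScan_cons_some ((k, v) :: ps) c s' (k, v)
            (List.find?_cons_of_pos (by simp [hk, hm]))]
      · have hrepl : pvRepl k v (c :: s') = c :: pvRepl k v s' := by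
          rw [pvRepl, if_neg (by simp [hm])]
        -- hypotheses of pvNoNew for any later pair p
        have hNN : ∀ p ∈ ps, ¬ p.1 <+: (c :: s') → ¬ p.1 <+: pvRepl k v (c :: s') := by
          intro p hp hnp
          have h0 : (0:Nat) < p.1.length := List.length_pos_of_ne_nil (hps p hp)
          have hkv' : ∀ j < p.1.length, pvCompat (p.1.drop j) v = false := by
            intro j hj
            rcases Nat.eq_zero_or_pos j with rfl | hj1
            · rw [List.drop_zero, pvCompat_comm]
              simpa using hInert p hp 0 (List.length_pos_of_ne_nil hv)
            · exact (hKey p hp j hj1 hj).1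
          have := pvNoNew k v p.1 hk hkv' (n + 1) (c :: s') hs 0 h0 (by simpa using hnp)
          simpa using this
        cases hF : ps.find? (fun q => !q.1.isEmpty && q.1.isPrefixOf (c :: s')) with
        | none =>
          -- no banned string starts here in s, hence none starts here in the replaced text
          have hnone2 : ∀ p ∈ ps, ¬ p.1 <+: (c :: s') := by
            intro p hp habs
            exact absurd (List.find?_eq_none.mp hF p hp)
              (by simp [hps p hp, List.isPrefixOf_iff_prefix.mpr habs])
          have hnoneR : ps.find? (fun q => !q.1.isEmpty && q.1.isPrefixOf (c :: pvRepl k v s')) = none := by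
            apply List.find?_eq_none.mpr
            intro p hp hP
            rcases Bool.and_eq_true .. |>.mp hP with ⟨-, hpre⟩
            exact hNN p hp (hnone2 p hp)
              (hrepl ▸ List.isPrefixOf_iff_prefix.mp hpre)
          rw [hrepl, pvScan_cons_none ps c _ hnoneR, ih s' (by simpa using hs),
            pvScan_cons_none ((k, v) :: ps) c s'
              (by rw [List.find?_cons_of_neg (by simp [hm]), hF])]
        | some p' =>
          -- the first banned string matching here matches in the replaced text too
          obtain ⟨hP', as, bs, hps_eq, has⟩ := List.find?_eq_some_iff_append.mp hF
          have hp'mem : p' ∈ ps := List.mem_of_find?_eq_some hF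
          have hp'1 : p'.1 ≠ [] := hps p' hp'mem
          have hp'pre : p'.1 <+: (c :: s') :=
            List.isPrefixOf_iff_prefix.mp (Bool.and_eq_true .. |>.mp hP').2
          have hp'len : (0:Nat) < p'.1.length := List.length_pos_of_ne_nil hp'1
          have hno : ∀ i < p'.1.length, ¬ k <+: (c :: s').drop i := by
            intro i hi habs
            rcases Nat.eq_zero_or_pos i with rfl | hi1
            · exact hm (List.isPrefixOf_iff_prefix.mpr (by simpa using habs))
            · obtain ⟨t, ht⟩ := hp'pre
              rw [← ht, List.drop_append_of_le_length (Nat.le_of_lt hi)] at habs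
              have hcf := pvCompat_eq_false (hKey p' hp'mem i hi1 hi).2
              rcases pvPrefixSplit habs with h1 | h1
              · exact hcf.2 h1
              · exact hcf.1 h1
          have hcomm := pvReplCommute k v p'.1.length (c :: s') hp'pre.length_le hno
          rw [(List.prefix_iff_eq_take.mp hp'pre).symm] at hcomm
          have hfindR : ps.find? (fun q => !q.1.isEmpty && q.1.isPrefixOf (c :: pvRepl k v s')) = some p' := by
            apply List.find?_eq_some_iff_append.mpr
            refine ⟨?_, as, bs, hps_eq, ?_⟩
            · have : p'.1 <+: pvRepl k v (c :: s') := hcomm ▸ List.prefix_append _ _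
              rw [hrepl] at this
              simp [hp'1, List.isPrefixOf_iff_prefix.mpr this]
            · intro a ha
              have hamem : a ∈ ps := hps_eq ▸ List.mem_append_left _ ha
              have hnota : ¬ a.1 <+: (c :: s') := by
                intro habs
                exact absurd (by simpa using has a ha)
                  (by simp [hps a hamem, List.isPrefixOf_iff_prefix.mpr habs])
              have := hNN a hamem hnota
              rw [hrepl] at this
              simp only [Bool.not_eq_eq_eq_not, Bool.not_true, Bool.and_eq_false_iff]
              right
              rw [← Bool.not_eq_true]
              intro habs
              exact this (List.isPrefixOf_iff_prefix.mp habs)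
          have hdroplen : (List.drop p'.1.length (c :: s')).length ≤ n := by
            simp only [List.length_drop, List.length_cons]
            simp only [List.length_cons] at hs
            omega
          rw [hrepl, pvScan_cons_some ps c _ p' hfindR, ← hrepl, hcomm, List.drop_left,
            ih (List.drop p'.1.length (c :: s')) hdroplen,
            pvScan_cons_some ((k, v) :: ps) c s' p'
              (by rw [List.find?_cons_of_neg (by simp [hm]), hF])]

theorem pvOKall_keys : ∀ (l : List (List Char × List Char)), pvOKall l = true → ∀ p ∈ l, p.1 ≠ [] := by
  intro l
  induction l with
  | nil => intro _ p hp; simp at hp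
  | cons q l ih =>
    obtain ⟨k, v⟩ := q
    intro h p hp
    simp only [pvOKall, Bool.and_eq_true] at h
    rcases List.mem_cons.mp hp with rfl | hp'
    · simpa [List.isEmpty_iff] using h.1.1.1
    · exact ih h.2 p hp'

theorem pvSeq_eq_scan : ∀ (l : List (List Char × List Char)), pvOKall l = true →
    ∀ s, List.foldl (fun c p => pvRepl p.1 p.2 c) s l = pvScan l s := by
  intro l
  induction l with
  | nil => intro _ s; simp [pvScan_empty]
  | cons q l ih =>
    obtain ⟨k, v⟩ := q
    intro h s
    simp only [pvOKall, Bool.and_eq_true] at h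
    obtain ⟨⟨⟨hk1, hv1⟩, hall⟩, hOKl⟩ := h
    have hk' : k ≠ [] := by simpa [List.isEmpty_iff] using hk1
    have hv' : v ≠ [] := by simpa [List.isEmpty_iff] using hv1
    have hps : ∀ p ∈ l, p.1 ≠ [] := pvOKall_keys l hOKl
    have hInert : ∀ p ∈ l, ∀ i < v.length, pvCompat (v.drop i) p.1 = false := by
      intro p hp i hi
      rcases Bool.and_eq_true .. |>.mp (List.all_eq_true.mp hall p hp) with ⟨hA, -⟩
      simpa using List.all_eq_true.mp hA i (List.mem_range.mpr hi)
    have hKey : ∀ p ∈ l, ∀ j, 1 ≤ j → j < p.1.length →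
        pvCompat (p.1.drop j) v = false ∧ pvCompat (p.1.drop j) k = false := by
      intro p hp j hj1 hj
      rcases Bool.and_eq_true .. |>.mp (List.all_eq_true.mp hall p hp) with ⟨-, hB⟩
      have := List.all_eq_true.mp hB j (List.mem_range.mpr hj)
      rcases Bool.or_eq_true .. |>.mp this with h0 | hgood
      · exact absurd (by simpa using h0 : j = 0) (by omega)
      · rcases Bool.and_eq_true .. |>.mp hgood with ⟨h1, h2⟩
        exact ⟨by simpa using h1, by simpa using h2⟩
    rw [List.foldl_cons, ih hOKl (pvRepl k v s),
      pvMain k v l hk' hv' hps hInert hKey s.length s (le_refl _)]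

theorem pvFoldA : ∀ (l : List (String × String)) (t : String), (∀ p ∈ l, p.1.toList ≠ []) →
    (List.foldl (fun t p => if PySem.Str.isIn p.1 t then PySem.Str.replace t p.1 p.2 else t) t l).toList
      = List.foldl (fun c p => pvRepl p.1 p.2 c) t.toList (l.map fun p => (p.1.toList, p.2.toList)) := by
  intro l
  induction l with
  | nil => intro t _; simp
  | cons p l ih =>
    intro t hkeys
    have hstep : (if PySem.Str.isIn p.1 t then PySem.Str.replace t p.1 p.2 else t).toList
        = pvRepl p.1.toList p.2.toList t.toList := by
      by_cases hIn : PySem.Str.isIn p.1 t = true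
      · rw [if_pos hIn, PySem.Str.toList_replace, pvReplace_eq _ _ _ (hkeys p (by simp))]
      · rw [if_neg hIn]
        exact (pvRepl_of_not_infix _ _ _
          (fun habs => hIn ((PySem.Str.isIn_iff_infix _ _).mpr habs))).symm
    rw [List.foldl_cons, ih _ (fun q hq => hkeys q (List.mem_cons_of_mem _ hq)), hstep,
      List.map_cons, List.foldl_cons]

-- ===== VERDICT (by name: the statement is the Claim_ definition above) =====
theorem sanitize_team_spec : Claim_equal_sanitize_team := by
  intro t _
  unfold Spec_sanitize_team
  have hA : (sanitize_team t).toList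
      = pvScan (pvReplacementsB.map (fun p => (p.1.toList, p.2.toList))) t.toList := by
    have hkeys : ∀ p ∈ pvReplacementsA, p.1.toList ≠ [] := by decide
    have hOK : pvOKall (pvReplacementsA.map (fun p => (p.1.toList, p.2.toList))) = true := by decide
    have hAB : pvReplacementsA = pvReplacementsB := by decide
    calc (sanitize_team t).toList
        = List.foldl (fun c p => pvRepl p.1 p.2 c) t.toList
            (pvReplacementsA.map fun p => (p.1.toList, p.2.toList)) := pvFoldA _ t hkeys
      _ = pvScan (pvReplacementsA.map (fun p => (p.1.toList, p.2.toList))) t.toList :=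
            pvSeq_eq_scan _ hOK _
      _ = _ := by rw [hAB]
  have : sanitize_team t = String.ofList ((sanitize_team t).toList) := String.ofList_toList.symm
  rw [this, hA]
  rfl
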